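-- pv_equiv track=rewrite | github.com/KarinaKazamanova/Algorithm | pyramidsort.py | pyramidsort
-- ===== SOURCE A (Python) =====
-- def pyramidsort(list_of_values: list[int]):
--     sorted_list_of_values = []
--     for i in list_of_values:
--         sorted_list_of_values.append(i)
--
--         for i in range(len(sorted_list_of_values)):
--             index = i
--             while index !=0:
--                 parent_index = (index - 1) // 2
--                 if sorted_list_of_values[index] <= sorted_list_of_values[parent_index]:
--                     break
--                 else:
--                     sorted_list_of_values[index], sorted_list_of_values[parent_index] = sorted_list_of_values[parent_index], sorted_list_of_values[index]
--
--                 index = parent_index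
--
--     return sorted_list_of_values
-- ===== SOURCE B (Python) =====
-- def pyramidsort(list_of_values):
--     heap = []
--     for value in list_of_values:
--         heap.append(value)
--         i = len(heap) - 1
--         while i > 0:
--             parent = (i - 1) // 2
--             if heap[i] > heap[parent]:
--                 heap[i], heap[parent] = heap[parent], heap[i]
--                 i = parent
--             else:
--                 break
--     return heap
-- ===== Notes on version B (the rewrite author's own statement) =====
-- stated objective: faster
-- what changed: Instead of re-running a sift-up pass over every index of the heap after each append, B sifts up only the newly appended element (standard binary-heap insertion); all other sift-ups are no-ops because the prefix is already a max-heap.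
import Mathlib
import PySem

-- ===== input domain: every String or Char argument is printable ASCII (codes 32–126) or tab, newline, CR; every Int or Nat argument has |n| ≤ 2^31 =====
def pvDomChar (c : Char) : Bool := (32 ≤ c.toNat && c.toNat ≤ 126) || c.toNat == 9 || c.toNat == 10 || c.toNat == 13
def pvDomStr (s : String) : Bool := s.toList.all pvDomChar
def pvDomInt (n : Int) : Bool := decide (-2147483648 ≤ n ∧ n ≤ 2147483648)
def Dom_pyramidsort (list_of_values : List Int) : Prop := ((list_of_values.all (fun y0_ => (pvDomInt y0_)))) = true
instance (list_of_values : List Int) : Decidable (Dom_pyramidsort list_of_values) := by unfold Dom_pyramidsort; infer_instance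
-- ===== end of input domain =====

-- B builds the max-heap by sifting up only the newly appended element (standard heap
-- insert) instead of A's full sift-up pass over every index after each append: faster.

-- ===== PORT A =====
-- the inner 'while index != 0' loop of A; indices stay in [0, len) so Nat subtraction
-- and Nat division here agree with Python's int arithmetic and '//'
def pyramidSiftA (l : List Int) (index : Nat) : List Int :=
  if _h : index = 0 then l
  else
    let parent := (index - 1) / 2
    if l.getD index 0 ≤ l.getD parent 0 then l
    else
      let a := l.getD index 0
      let b := l.getD parent 0
      pyramidSiftA ((l.set index b).set parent a) parent
termination_by index
decreasing_by
  have := Nat.div_le_self (index - 1) 2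
  omega

def pyramidsort (list_of_values : List Int) : List Int :=
  list_of_values.foldl
    (fun sorted_list_of_values i =>
      let s := sorted_list_of_values ++ [i]
      (List.range s.length).foldl (fun t j => pyramidSiftA t j) s)
    []

-- ===== PORT B =====
-- Source B's 'while i > 0' sift-up of the last element
def altSiftUp (heap : List Int) (i : Nat) : List Int :=
  if _h : i > 0 then
    let parent := (i - 1) / 2
    if heap.getD parent 0 < heap.getD i 0 then
      altSiftUp ((heap.set i (heap.getD parent 0)).set parent (heap.getD i 0)) parent
    else heap
  else heap
termination_by i
decreasing_by
  have := Nat.div_le_self (i - 1) 2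
  omega

def pyramidsort_alt (list_of_values : List Int) : List Int :=
  list_of_values.foldl
    (fun heap value =>
      let h := heap ++ [value]
      altSiftUp h (h.length - 1))
    []

-- ===== PRECONDITION & SPEC =====
def Spec_pyramidsort (list_of_values : List Int) (out : List Int) : Prop := out = pyramidsort_alt list_of_values
instance (list_of_values : List Int) (out : List Int) : Decidable (Spec_pyramidsort list_of_values out) := by unfold Spec_pyramidsort; infer_instance

-- ===== CLAIM (what is proved, stated in full; the proofs are below) =====
def Claim_equal_pyramidsort : Prop := ∀ (list_of_values : List Int), Dom_pyramidsort list_of_values → Spec_pyramidsort list_of_values (pyramidsort list_of_values)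

-- ===== LEMMAS AND PROOFS =====

-- l is a max-heap (every non-root element ≤ its parent)
def PvIsHeap (l : List Int) : Prop :=
  ∀ j, 1 ≤ j → j < l.length → l.getD j 0 ≤ l.getD ((j - 1) / 2) 0

-- invariant of the sift-up loop at current index i
def PvInv (l : List Int) (i : Nat) : Prop :=
  (∀ j, 1 ≤ j → j < l.length → j ≠ i → l.getD j 0 ≤ l.getD ((j - 1) / 2) 0) ∧
  (∀ c, 1 ≤ c → c < l.length → (c - 1) / 2 = i →
      l.getD c 0 ≤ l.getD i 0 ∧ (i ≠ 0 → l.getD c 0 ≤ l.getD ((i - 1) / 2) 0))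

lemma pv_getD_set_self (l : List Int) (i : Nat) (a : Int) (h : i < l.length) :
    (l.set i a).getD i 0 = a := by
  simp [List.getD_eq_getElem?_getD, h]

lemma pv_getD_set_ne (l : List Int) (i j : Nat) (a : Int) (h : i ≠ j) :
    (l.set i a).getD j 0 = l.getD j 0 := by
  simp [List.getD_eq_getElem?_getD, List.getElem?_set_ne h]

lemma pv_getD_append_lt (s : List Int) (v : Int) (k : Nat) (h : k < s.length) :
    (s ++ [v]).getD k 0 = s.getD k 0 := by
  simp [List.getD_eq_getElem?_getD, List.getElem?_append_left h]

-- unfolding lemmas for the two sift-up loops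
lemma siftA_zero (l : List Int) : pyramidSiftA l 0 = l := by
  rw [pyramidSiftA]
  simp

lemma siftA_succ (l : List Int) (i : Nat) (h0 : i ≠ 0) :
    pyramidSiftA l i =
      if l.getD i 0 ≤ l.getD ((i - 1) / 2) 0 then l
      else pyramidSiftA ((l.set i (l.getD ((i - 1) / 2) 0)).set ((i - 1) / 2) (l.getD i 0))
        ((i - 1) / 2) := by
  rw [pyramidSiftA, dif_neg h0]

lemma altSiftUp_zero (l : List Int) : altSiftUp l 0 = l := by
  rw [altSiftUp]
  simp

lemma altSiftUp_succ (l : List Int) (i : Nat) (h0 : i ≠ 0) :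
    altSiftUp l i =
      if l.getD ((i - 1) / 2) 0 < l.getD i 0 then
        altSiftUp ((l.set i (l.getD ((i - 1) / 2) 0)).set ((i - 1) / 2) (l.getD i 0))
          ((i - 1) / 2)
      else l := by
  rw [altSiftUp, dif_pos (Nat.pos_of_ne_zero h0)]

-- both sift-ups are the same loop (A breaks on ≤, B continues on >)
lemma pv_sift_eq : ∀ i l, pyramidSiftA l i = altSiftUp l i := by
  intro i
  induction i using Nat.strong_induction_on with
  | _ i ih =>
    intro l
    by_cases h0 : i = 0
    · rw [h0, siftA_zero, altSiftUp_zero]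
    · have hp : (i - 1) / 2 < i := by
        have := Nat.div_le_self (i - 1) 2; omega
      rw [siftA_succ l i h0, altSiftUp_succ l i h0]
      by_cases hle : l.getD i 0 ≤ l.getD ((i - 1) / 2) 0
      · rw [if_pos hle, if_neg (not_lt.mpr hle)]
      · rw [if_neg hle, if_pos (lt_of_not_ge hle)]
        exact ih _ hp _

lemma pv_sift_noop (l : List Int) (j : Nat)
    (h : j = 0 ∨ l.getD j 0 ≤ l.getD ((j - 1) / 2) 0) :
    pyramidSiftA l j = l := by
  rcases h with h | h
  · rw [h, siftA_zero]
  · by_cases h0 : j = 0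
    · rw [h0, siftA_zero]
    · rw [siftA_succ l j h0, if_pos h]

-- sift-up preserves length and, given the invariant, (re)establishes the heap property
lemma pv_sift_inv : ∀ i l, i < l.length → PvInv l i →
    PvIsHeap (pyramidSiftA l i) ∧ (pyramidSiftA l i).length = l.length := by
  intro i
  induction i using Nat.strong_induction_on with
  | _ i ih =>
    intro l hi ⟨h1, h2⟩
    by_cases h0 : i = 0
    · subst h0
      rw [siftA_zero]
      exact ⟨fun j hj1 hjl => h1 j hj1 hjl (by omega), rfl⟩
    · rw [siftA_succ l i h0]
      set p := (i - 1) / 2 with hpdef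
      have hpi : p < i := by have := Nat.div_le_self (i - 1) 2; omega
      have hpl : p < l.length := lt_trans hpi hi
      by_cases hle : l.getD i 0 ≤ l.getD p 0
      · rw [if_pos hle]
        refine ⟨?_, rfl⟩
        intro j hj1 hjl
        by_cases hji : j = i
        · subst hji; exact hle
        · exact h1 j hj1 hjl hji
      · rw [if_neg hle]
        set l' := (l.set i (l.getD p 0)).set p (l.getD i 0) with hl'
        have hlen' : l'.length = l.length := by simp [hl']
        have hip : i ≠ p := by omega
        have hgi : l'.getD i 0 = l.getD p 0 := by
          rw [hl', pv_getD_set_ne _ _ _ _ (Ne.symm hip), pv_getD_set_self _ _ _ hi]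
        have hgp : l'.getD p 0 = l.getD i 0 := by
          rw [hl', pv_getD_set_self _ _ _ (by simpa [List.length_set] using hpl)]
        have hother : ∀ k, k ≠ i → k ≠ p → l'.getD k 0 = l.getD k 0 := by
          intro k hki hkp
          rw [hl', pv_getD_set_ne _ _ _ _ (Ne.symm hkp), pv_getD_set_ne _ _ _ _ (Ne.symm hki)]
        have hlt : l.getD p 0 < l.getD i 0 := lt_of_not_ge hle
        have hinv' : PvInv l' p := by
          constructor
          · -- every edge except the one at p holds in l'
            intro j hj1 hjl hjp
            rw [hlen'] at hjl
            by_cases hji : j = i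
            · -- edge (i, p)
              subst hji
              rw [hgi, ← hpdef, hgp]
              exact le_of_lt hlt
            · have hj' : l'.getD j 0 = l.getD j 0 := hother j hji hjp
              by_cases hq : (j - 1) / 2 = p
              · -- sibling of i under p
                rw [hj', hq, hgp]
                have hedge := h1 j hj1 hjl hji
                rw [hq] at hedge
                exact le_trans hedge (le_of_lt hlt)
              · by_cases hq2 : (j - 1) / 2 = i
                · -- a child of i: bounded by the grandparent l[p]
                  rw [hj', hq2, hgi]
                  exact (h2 j hj1 hjl hq2).2 h0
                · rw [hj', hother _ hq2 hq]
                  exact h1 j hj1 hjl hji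
          · -- children of the new index p
            intro c hc1 hcl hcp
            rw [hlen'] at hcl
            have hcp' : c ≠ p := by
              intro hcc; rw [hcc] at hcp
              have := Nat.div_le_self (c - 1) 2; omega
            have hppl : p ≠ 0 → ((p - 1) / 2) ≠ i ∧ ((p - 1) / 2) ≠ p := by
              intro hp0
              have := Nat.div_le_self (p - 1) 2; omega
            by_cases hci : c = i
            · subst hci
              constructor
              · rw [hgi, hgp]; exact le_of_lt hlt
              · intro hp0
                rw [hgi, hother _ (hppl hp0).1 (hppl hp0).2]
                have := h1 p (by omega) hpl (by omega)
                simpa [hpdef] using this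
            · have hc' : l'.getD c 0 = l.getD c 0 := hother c hci hcp'
              have hcle : l.getD c 0 ≤ l.getD p 0 := by
                have := h1 c hc1 hcl hci; rw [hcp] at this; exact this
              constructor
              · rw [hc', hgp]; exact le_trans hcle (le_of_lt hlt)
              · intro hp0
                rw [hc', hother _ (hppl hp0).1 (hppl hp0).2]
                refine le_trans hcle ?_
                have := h1 p (by omega) hpl (by omega)
                simpa [hpdef] using this
        have := ih p hpi l' (by omega) hinv'
        exact ⟨this.1, by rw [this.2, hlen']⟩

-- appending v to a heap s gives the invariant at the last index
lemma pv_append_inv (s : List Int) (v : Int) (h : PvIsHeap s) :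
    PvInv (s ++ [v]) s.length := by
  constructor
  · intro j hj1 hjl hji
    have hjs : j < s.length := by simp at hjl; omega
    have hps : (j - 1) / 2 < s.length := by
      have := Nat.div_le_self (j - 1) 2; omega
    rw [pv_getD_append_lt _ _ _ hjs, pv_getD_append_lt _ _ _ hps]
    exact h j hj1 hjs
  · intro c hc1 hcl hcp
    exfalso
    have := Nat.div_mul_le_self (c - 1) 2
    rw [hcp] at this
    simp at hcl
    omega

-- A's pass over range (n-1) does nothing on a heap-prefix
lemma pv_range_noop (l : List Int) (m : Nat)
    (h : ∀ j, 1 ≤ j → j < m → l.getD j 0 ≤ l.getD ((j - 1) / 2) 0) :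
    (List.range m).foldl (fun t j => pyramidSiftA t j) l = l := by
  induction m with
  | zero => simp
  | succ m ihm =>
    rw [List.range_succ, List.foldl_append,
      ihm (fun j hj1 hjm => h j hj1 (by omega))]
    simp only [List.foldl_cons, List.foldl_nil]
    by_cases hm : m = 0
    · exact pv_sift_noop l m (Or.inl hm)
    · exact pv_sift_noop l m (Or.inr (h m (by omega) (by omega)))

-- the two folds agree step by step, carrying the heap invariant
lemma pv_main : ∀ (lv s : List Int), PvIsHeap s →
    List.foldl (fun s i =>
        let t := s ++ [i]
        (List.range t.length).foldl (fun t j => pyramidSiftA t j) t) s lv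
    = List.foldl (fun heap value =>
        let h := heap ++ [value]
        altSiftUp h (h.length - 1)) s lv := by
  intro lv
  induction lv with
  | nil => intro s _; rfl
  | cons v lv ihlv =>
    intro s hs
    simp only [List.foldl_cons]
    set t := s ++ [v] with ht
    have htl : t.length = s.length + 1 := by simp [ht]
    have hinv := pv_append_inv s v hs
    have hstep : (List.range t.length).foldl (fun t j => pyramidSiftA t j) t
        = pyramidSiftA t s.length := by
      rw [htl, List.range_succ, List.foldl_append]
      rw [pv_range_noop t s.length (fun j hj1 hjm => by
        have hps : (j - 1) / 2 < s.length := by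
          have := Nat.div_le_self (j - 1) 2; omega
        rw [ht, pv_getD_append_lt _ _ _ hjm, pv_getD_append_lt _ _ _ hps]
        exact hs j hj1 hjm)]
      simp
    have hheap : PvIsHeap (pyramidSiftA t s.length) :=
      (pv_sift_inv s.length t (by omega) hinv).1
    rw [hstep, ihlv _ hheap, pv_sift_eq, htl]
    simp

-- ===== VERDICT (by name: the statement is the Claim_ definition above) =====
theorem pyramidsort_spec : Claim_equal_pyramidsort := by
  intro lv _
  unfold Spec_pyramidsort pyramidsort pyramidsort_alt
  exact pv_main lv [] (by intro j hj1 hjl; simp at hjl)
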